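-- pv_equiv track=rewrite | github.com/manohar890/AssignmentsDsp | Assignment18-01-23.py | maxoftriplet2
-- ===== SOURCE A (Python) =====
-- def maxoftriplet2(lis):
--     res = 0
--     for i in range (len(lis)):
--         for j in range(i+1,len(lis)):
--             for k in range(j+1,len(lis)):
--                 if res < lis[i]*lis[j]*lis[k]:
--                     res=lis[i]*lis[j]*lis[k]
--     return res
-- ===== SOURCE B (Python) =====
-- def maxoftriplet2(lis):
--     if len(lis) < 3:
--         return 0
--     s = sorted(lis)
--     return max(0, s[-1] * s[-2] * s[-3], s[0] * s[1] * s[-1])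
-- ===== Notes on version B (the rewrite author's own statement) =====
-- stated objective: faster
-- what changed: Replaced the O(n^3) triple nested loop over all index triples by sorting once and comparing only two candidate products (three largest, and two smallest times the largest), maxed with 0.
import Mathlib
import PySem

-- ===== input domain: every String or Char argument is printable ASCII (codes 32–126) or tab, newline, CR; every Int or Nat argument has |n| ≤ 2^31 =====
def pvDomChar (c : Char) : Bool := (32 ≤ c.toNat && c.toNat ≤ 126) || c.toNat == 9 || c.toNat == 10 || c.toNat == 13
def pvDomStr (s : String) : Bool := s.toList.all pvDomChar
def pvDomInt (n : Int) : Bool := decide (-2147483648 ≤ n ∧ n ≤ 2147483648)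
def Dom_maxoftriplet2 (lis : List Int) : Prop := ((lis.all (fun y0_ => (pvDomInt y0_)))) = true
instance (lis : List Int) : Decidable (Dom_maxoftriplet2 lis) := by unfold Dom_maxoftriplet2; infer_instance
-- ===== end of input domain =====

-- B sorts once and compares two candidate triple products instead of A's cubic scan of all index triples (objective: faster, asymptotic).


-- ===== PORT A =====
def maxoftriplet2 (lis : List Int) : Int :=
  (PySem.List.pyRange 0 (lis.length : Int) 1).foldl (fun res i =>
    (PySem.List.pyRange (i + 1) (lis.length : Int) 1).foldl (fun res j =>
      (PySem.List.pyRange (j + 1) (lis.length : Int) 1).foldl (fun res k =>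
        if res < PySem.List.pyGetD lis i 0 * PySem.List.pyGetD lis j 0 * PySem.List.pyGetD lis k 0 then
          PySem.List.pyGetD lis i 0 * PySem.List.pyGetD lis j 0 * PySem.List.pyGetD lis k 0
        else res) res) res) 0

-- ===== PORT B =====
def maxoftriplet2_alt (lis : List Int) : Int :=
  if lis.length < 3 then 0
  else
    let s := PySem.List.sorted lis (fun x => x) false
    max (max 0 (PySem.List.pyGetD s (-1) 0 * PySem.List.pyGetD s (-2) 0 * PySem.List.pyGetD s (-3) 0))
      (PySem.List.pyGetD s 0 0 * PySem.List.pyGetD s 1 0 * PySem.List.pyGetD s (-1) 0)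

-- ===== PRECONDITION & SPEC =====
def Spec_maxoftriplet2 (lis : List Int) (out : Int) : Prop := out = maxoftriplet2_alt lis
instance (lis : List Int) (out : Int) : Decidable (Spec_maxoftriplet2 lis out) := by unfold Spec_maxoftriplet2; infer_instance

-- ===== CLAIM (what is proved, stated in full; the proofs are below) =====
def Claim_equal_maxoftriplet2 : Prop := ∀ (lis : List Int), Dom_maxoftriplet2 lis → Spec_maxoftriplet2 lis (maxoftriplet2 lis)

-- ===== LEMMAS AND PROOFS =====

-- products lis[j]*lis[k] over all index pairs j < k, in A's iteration order
def pairProds : List Int → List Int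
  | [] => []
  | b :: t => t.map (b * ·) ++ pairProds t

-- products lis[i]*lis[j]*lis[k] over all index triples i < j < k, in A's iteration order
def tripProds : List Int → List Int
  | [] => []
  | a :: t => (pairProds t).map (a * ·) ++ tripProds t

-- the three loop levels of A, phrased structurally over suffixes of lis
def loopK (p : Int) (l : List Int) (r : Int) : Int := l.foldl (fun r c => max r (p * c)) r

def loopJ (a : Int) : List Int → Int → Int
  | [], r => r
  | b :: t, r => loopJ a t (loopK (a * b) t r)

def loopI : List Int → Int → Int
  | [], r => r
  | a :: t, r => loopI t (loopJ a t r)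

lemma if_lt_eq_max (r x : Int) : (if r < x then x else r) = max r x := by
  rw [max_def]; split_ifs <;> omega

lemma loopK_eq (p : Int) (l : List Int) (r : Int) :
    loopK p l r = (l.map (p * ·)).foldl max r := by
  rw [loopK, List.foldl_map]

lemma loopJ_eq (a : Int) (l : List Int) (r : Int) :
    loopJ a l r = ((pairProds l).map (a * ·)).foldl max r := by
  induction l generalizing r with
  | nil => rfl
  | cons b t ih =>
      rw [loopJ, ih, loopK_eq, pairProds, List.map_append, List.foldl_append,
        List.map_map]
      congr 2
      apply List.map_congr_left
      intro x _
      simp [mul_assoc]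

lemma loopI_eq (l : List Int) (r : Int) :
    loopI l r = (tripProds l).foldl max r := by
  induction l generalizing r with
  | nil => rfl
  | cons a t ih =>
      rw [loopI, ih, loopJ_eq, tripProds, List.foldl_append]

-- the innermost pyRange fold of A is loopK on the suffix after j
lemma inner_eq (lis : List Int) (p : Int) (j : Int) (hj : 0 ≤ j) (r : Int) :
    (PySem.List.pyRange (j + 1) (lis.length : Int) 1).foldl
      (fun r k => max r (p * PySem.List.pyGetD lis k 0)) r
    = loopK p (lis.drop (j.toNat + 1)) r := by
  rw [loopK]
  have h := PySem.List.map_pyGetD_pyRange (xs := lis) (d := (0 : Int)) (a := j + 1) (by omega)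
  have h2 : (j + 1).toNat = j.toNat + 1 := by omega
  simp only [PySem.List.len] at h
  rw [← h2, ← h, List.foldl_map]

-- the middle pyRange fold of A is loopJ on the suffix after i
lemma middle_eq (lis : List Int) (a : Int) :
    ∀ (d m : Nat), lis.length - m = d → ∀ r : Int,
    (PySem.List.pyRange (m : Int) (lis.length : Int) 1).foldl
      (fun r j => loopK (a * PySem.List.pyGetD lis j 0) (lis.drop (j.toNat + 1)) r) r
    = loopJ a (lis.drop m) r := by
  intro d
  induction d with
  | zero =>
      intro m hm r
      have hemp : PySem.List.pyRange (m : Int) (lis.length : Int) = [] := by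
        rw [PySem.List.pyRange_one]
        have h0 : ((lis.length : Int) - (m : Int)).toNat = 0 := by omega
        rw [h0]; rfl
      have hdrop : lis.drop m = [] := List.drop_eq_nil_iff.mpr (by omega)
      rw [hemp, hdrop]; rfl
  | succ d ih =>
      intro m hm r
      have hlt : (m : Int) < (lis.length : Int) := by omega
      have hmlen : m < lis.length := by omega
      rw [PySem.List.pyRange_one_cons hlt, List.foldl_cons,
        List.drop_eq_getElem_cons hmlen, loopJ]
      have hcast : (m : Int) + 1 = ((m + 1 : Nat) : Int) := by push_cast; ring
      have hget : PySem.List.pyGetD lis (m : Int) 0 = lis[m] := by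
        rw [PySem.List.pyGetD_natCast, List.getD_eq_getElem lis 0 hmlen]
      have htn : ((m : Int)).toNat + 1 = m + 1 := by omega
      rw [hget, htn, hcast, ih (m + 1) (by omega)]

-- the outer pyRange fold of A is loopI
lemma outer_eq (lis : List Int) :
    ∀ (d m : Nat), lis.length - m = d → ∀ r : Int,
    (PySem.List.pyRange (m : Int) (lis.length : Int) 1).foldl
      (fun r i => loopJ (PySem.List.pyGetD lis i 0) (lis.drop (i.toNat + 1)) r) r
    = loopI (lis.drop m) r := by
  intro d
  induction d with
  | zero =>
      intro m hm r
      have hemp : PySem.List.pyRange (m : Int) (lis.length : Int) = [] := by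
        rw [PySem.List.pyRange_one]
        have h0 : ((lis.length : Int) - (m : Int)).toNat = 0 := by omega
        rw [h0]; rfl
      have hdrop : lis.drop m = [] := List.drop_eq_nil_iff.mpr (by omega)
      rw [hemp, hdrop]; rfl
  | succ d ih =>
      intro m hm r
      have hlt : (m : Int) < (lis.length : Int) := by omega
      have hmlen : m < lis.length := by omega
      rw [PySem.List.pyRange_one_cons hlt, List.foldl_cons,
        List.drop_eq_getElem_cons hmlen, loopI]
      have hcast : (m : Int) + 1 = ((m + 1 : Nat) : Int) := by push_cast; ring
      have hget : PySem.List.pyGetD lis (m : Int) 0 = lis[m] := by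
        rw [PySem.List.pyGetD_natCast, List.getD_eq_getElem lis 0 hmlen]
      have htn : ((m : Int)).toNat + 1 = m + 1 := by omega
      rw [hget, htn, hcast, ih (m + 1) (by omega)]

lemma A_eq_fold (lis : List Int) : maxoftriplet2 lis = (tripProds lis).foldl max 0 := by
  rw [← loopI_eq]
  have houter := outer_eq lis lis.length 0 (by omega) 0
  rw [List.drop_zero] at houter
  rw [maxoftriplet2]
  simp only [if_lt_eq_max]
  rw [← houter]
  show ((PySem.List.pyRange ((0 : Nat) : Int) (lis.length : Int)).foldl _ 0) = _
  apply PySem.List.foldl_congr_mem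
  intro acc i hi
  obtain ⟨hi0, hilt⟩ := PySem.List.mem_pyRange_one.mp hi
  have hcast : ((i.toNat + 1 : Nat) : Int) = i + 1 := by omega
  have hmid := middle_eq lis (PySem.List.pyGetD lis i 0)
    (lis.length - (i.toNat + 1)) (i.toNat + 1) (by omega) acc
  rw [hcast] at hmid
  rw [← hmid]
  apply PySem.List.foldl_congr_mem
  intro acc2 j hj
  obtain ⟨hj0, hjlt⟩ := PySem.List.mem_pyRange_one.mp hj
  exact inner_eq lis (PySem.List.pyGetD lis i 0 * PySem.List.pyGetD lis j 0) j (by omega) acc2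

-- permutation invariance of the multiset of pair/triple products
lemma prods_perm {l l' : List Int} (h : l.Perm l') :
    (pairProds l).Perm (pairProds l') ∧ (tripProds l).Perm (tripProds l') := by
  induction h with
  | nil => exact ⟨.nil, .nil⟩
  | cons x h ih =>
      exact ⟨(h.map (x * ·)).append ih.1, ((ih.1).map (x * ·)).append ih.2⟩
  | swap x y l =>
      constructor
      · simp only [pairProds, List.cons_append, List.map_cons]
        rw [mul_comm y x]
        exact .cons _ (List.perm_append_comm_assoc _ _ _)
      · simp only [tripProds, pairProds, List.map_append, List.map_map, List.append_assoc]
        have hmap : l.map ((y * ·) ∘ (x * ·)) = l.map ((x * ·) ∘ (y * ·)) := by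
          apply List.map_congr_left
          intro z _
          simp [Function.comp]
          ring
        rw [hmap]
        exact List.Perm.append_left _ (List.perm_append_comm_assoc _ _ _)
  | trans h1 h2 ih1 ih2 =>
      exact ⟨ih1.1.trans ih2.1, ih1.2.trans ih2.2⟩

-- membership characterisations by indices
lemma mem_pairProds {l : List Int} {t : Int} (h : t ∈ pairProds l) :
    ∃ i j : Nat, i < j ∧ j < l.length ∧ t = l.getD i 0 * l.getD j 0 := by
  induction l with
  | nil => simp [pairProds] at h
  | cons b u ih =>
      rw [pairProds] at h
      rcases List.mem_append.mp h with h1 | h2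
      · obtain ⟨c, hc, rfl⟩ := List.mem_map.mp h1
        obtain ⟨n, hn, rfl⟩ := List.mem_iff_getElem.mp hc
        exact ⟨0, n + 1, by omega, by simpa using hn,
          by rw [List.getD_cons_zero, List.getD_cons_succ, List.getD_eq_getElem u 0 hn]⟩
      · obtain ⟨i, j, hij, hj, rfl⟩ := ih h2
        exact ⟨i + 1, j + 1, by omega, by simpa using hj,
          by rw [List.getD_cons_succ, List.getD_cons_succ]⟩

lemma mem_tripProds {l : List Int} {t : Int} (h : t ∈ tripProds l) :
    ∃ i j k : Nat, i < j ∧ j < k ∧ k < l.length ∧ t = l.getD i 0 * l.getD j 0 * l.getD k 0 := by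
  induction l with
  | nil => simp [tripProds] at h
  | cons b u ih =>
      rw [tripProds] at h
      rcases List.mem_append.mp h with h1 | h2
      · obtain ⟨c, hc, rfl⟩ := List.mem_map.mp h1
        obtain ⟨i, j, hij, hj, rfl⟩ := mem_pairProds hc
        exact ⟨0, i + 1, j + 1, by omega, by omega, by simpa using hj,
          by rw [List.getD_cons_zero, List.getD_cons_succ, List.getD_cons_succ, mul_assoc]⟩
      · obtain ⟨i, j, k, hij, hjk, hk, rfl⟩ := ih h2
        exact ⟨i + 1, j + 1, k + 1, by omega, by omega, by simpa using hk,
          by rw [List.getD_cons_succ, List.getD_cons_succ, List.getD_cons_succ]⟩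

lemma pairProds_mem {l : List Int} {i j : Nat} (hij : i < j) (hj : j < l.length) :
    l.getD i 0 * l.getD j 0 ∈ pairProds l := by
  induction l generalizing i j with
  | nil => simp at hj
  | cons b u ih =>
      rw [pairProds]
      match i, j with
      | 0, j + 1 =>
          have hj' : j < u.length := by simpa using hj
          rw [List.getD_cons_zero, List.getD_cons_succ, List.getD_eq_getElem u 0 hj']
          exact List.mem_append_left _ (List.mem_map_of_mem (List.getElem_mem hj'))
      | i + 1, j + 1 =>
          rw [List.getD_cons_succ, List.getD_cons_succ]
          exact List.mem_append_right _ (ih (by omega) (by simpa using hj))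

lemma tripProds_mem {l : List Int} {i j k : Nat} (hij : i < j) (hjk : j < k) (hk : k < l.length) :
    l.getD i 0 * l.getD j 0 * l.getD k 0 ∈ tripProds l := by
  induction l generalizing i j k with
  | nil => simp at hk
  | cons b u ih =>
      rw [tripProds]
      match i, j, k with
      | 0, j + 1, k + 1 =>
          have hmem := pairProds_mem (l := u) (i := j) (j := k) (by omega) (by simpa using hk)
          rw [List.getD_cons_zero, List.getD_cons_succ, List.getD_cons_succ, mul_assoc]
          exact List.mem_append_left _ (List.mem_map_of_mem hmem)
      | i + 1, j + 1, k + 1 =>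
          rw [List.getD_cons_succ, List.getD_cons_succ, List.getD_cons_succ]
          exact List.mem_append_right _ (ih (by omega) (by omega) (by simpa using hk))

lemma tripProds_nil_of_short {l : List Int} (h : l.length < 3) : tripProds l = [] := by
  match l with
  | [] => rfl
  | [a] => rfl
  | [a, b] => rfl
  | a :: b :: c :: t => simp only [List.length_cons] at h; omega

-- the key order lemma: any i<j<k triple product on a sorted list is below one of B's two candidates
lemma key_ineq (x y p q r a b c : Int)
    (hxa : x ≤ a) (hyb : y ≤ b) (hap : a ≤ p) (hbq : b ≤ q) (hcr : c ≤ r)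
    (hab : a ≤ b) (hbc : b ≤ c) (hpq : p ≤ q) (hqr : q ≤ r) (hyp : y ≤ p) :
    a * b * c ≤ max (p * q * r) (x * y * r) := by
  rw [le_max_iff]
  rcases le_or_gt c 0 with hc | hc
  · rcases le_or_gt r 0 with hr | hr
    · -- everything nonpositive: a*b ≥ p*q ≥ 0 gives a*b*c ≤ p*q*r
      left
      have hq0 : q ≤ 0 := hqr.trans hr
      have hp0 : p ≤ 0 := hpq.trans hq0
      have hb0 : b ≤ 0 := hbq.trans hq0
      have h1 : p * q ≤ a * b := by
        nlinarith [mul_nonneg (sub_nonneg.2 hap) (neg_nonneg.2 hb0),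
          mul_nonneg (neg_nonneg.2 hp0) (sub_nonneg.2 hbq)]
      have h2 : (0 : Int) ≤ p * q := by
        nlinarith [mul_nonneg (neg_nonneg.2 hp0) (neg_nonneg.2 hq0)]
      nlinarith [mul_nonneg (sub_nonneg.2 hcr) (h2.trans h1),
        mul_nonneg (sub_nonneg.2 h1) (neg_nonneg.2 hr)]
    · -- c ≤ 0 < r: x*y*r ≥ 0 ≥ a*b*c
      right
      have ha0 : a ≤ 0 := hab.trans (hbc.trans hc)
      have hb0 : b ≤ 0 := hbc.trans hc
      have hx0 : x ≤ 0 := hxa.trans ha0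
      have hy0 : y ≤ 0 := hyb.trans hb0
      nlinarith [mul_nonneg (mul_nonneg (neg_nonneg.2 hx0) (neg_nonneg.2 hy0)) hr.le,
        mul_nonneg (mul_nonneg (neg_nonneg.2 ha0) (neg_nonneg.2 hb0)) (neg_nonneg.2 hc)]
  · have hr : 0 < r := lt_of_lt_of_le hc hcr
    rcases le_or_gt 0 a with ha | ha
    · -- 0 ≤ a ≤ b ≤ c: componentwise below p*q*r
      left
      have hb0 : 0 ≤ b := ha.trans hab
      have hp0 : 0 ≤ p := ha.trans hap
      have h1 : a * b ≤ p * q := mul_le_mul hap hbq hb0 hp0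
      have h2 : 0 ≤ a * b := mul_nonneg ha hb0
      nlinarith [mul_nonneg (sub_nonneg.2 h1) hc.le,
        mul_nonneg (sub_nonneg.2 hcr) (h2.trans h1)]
    · rcases le_or_gt b 0 with hb | hb
      · -- a < 0, b ≤ 0: x*y ≥ a*b ≥ 0, so x*y*r ≥ a*b*r ≥ a*b*c
        right
        have hx0 : x ≤ 0 := hxa.trans ha.le
        have hy0 : y ≤ 0 := hyb.trans hb
        have hxy : a * b ≤ x * y := by
          nlinarith [mul_nonneg (sub_nonneg.2 hxa) (neg_nonneg.2 hb),
            mul_nonneg (neg_nonneg.2 hx0) (sub_nonneg.2 hyb)]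
        have hab0 : 0 ≤ a * b := by
          nlinarith [mul_nonneg (neg_nonneg.2 ha.le) (neg_nonneg.2 hb)]
        nlinarith [mul_nonneg (sub_nonneg.2 hcr) hab0,
          mul_nonneg (sub_nonneg.2 hxy) hr.le]
      · -- a < 0 < b ≤ c: a*b*c < 0
        have habc : a * b * c < 0 := by
          have hbc0 : 0 < b * c := mul_pos hb hc
          nlinarith
        rcases le_or_gt y 0 with hy | hy
        · -- x*y*r ≥ 0 > a*b*c
          right
          have hx0 : x ≤ 0 := hxa.trans ha.le
          nlinarith [mul_nonneg (mul_nonneg (neg_nonneg.2 hx0) (neg_nonneg.2 hy)) hr.le]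
        · -- 0 < y ≤ p, 0 < b ≤ q: p*q*r > 0 > a*b*c
          left
          have hp0 : 0 < p := lt_of_lt_of_le hy hyp
          have hq0 : 0 < q := lt_of_lt_of_le hb hbq
          nlinarith [mul_pos (mul_pos hp0 hq0) hr]

lemma main_eq (lis : List Int) : maxoftriplet2 lis = maxoftriplet2_alt lis := by
  rcases Nat.lt_or_ge lis.length 3 with hlen | hlen
  · rw [A_eq_fold, tripProds_nil_of_short hlen, maxoftriplet2_alt, if_pos hlen]
    rfl
  · set s := PySem.List.sorted lis (fun x => x) false with hs
    have hslen : s.length = lis.length := PySem.List.length_sorted lis _ false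
    have hn3 : 3 ≤ s.length := by omega
    have hne : ¬ lis.length < 3 := by omega
    have mono : ∀ (p q : Nat), p ≤ q → q < s.length → s.getD p 0 ≤ s.getD q 0 := by
      intro p q hpq hq
      rw [List.getD_eq_getElem s 0 (lt_of_le_of_lt hpq hq), List.getD_eq_getElem s 0 hq]
      exact PySem.List.sorted_id_getElem_mono lis hpq hq
    -- A as a fold of max over the triple products of the sorted list
    have hA : maxoftriplet2 lis = (tripProds s).foldl max 0 := by
      rw [A_eq_fold]
      exact (List.Perm.foldl_op_eq (prods_perm (PySem.List.sorted_perm lis _ false)).2).symm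
    -- B in terms of getD on the sorted list
    have hB : maxoftriplet2_alt lis =
        max (max 0 (s.getD (s.length - 1) 0 * s.getD (s.length - 2) 0 * s.getD (s.length - 3) 0))
          (s.getD 0 0 * s.getD 1 0 * s.getD (s.length - 1) 0) := by
      simp only [maxoftriplet2_alt, if_neg hne]
      rw [← hs,
        PySem.List.pyGetD_neg_ofNat s 1 0 (by norm_num) (by omega),
        PySem.List.pyGetD_neg_ofNat s 2 0 (by norm_num) (by omega),
        PySem.List.pyGetD_neg_ofNat s 3 0 (by norm_num) (by omega),
        PySem.List.pyGetD_ofNat' s 0 0, PySem.List.pyGetD_ofNat' s 1 0,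
        ← List.getD_eq_getElem s 0 (by omega : s.length - 1 < s.length),
        ← List.getD_eq_getElem s 0 (by omega : s.length - 2 < s.length),
        ← List.getD_eq_getElem s 0 (by omega : s.length - 3 < s.length)]
    -- both candidates are triple products of s
    have hc1 : s.getD (s.length - 3) 0 * s.getD (s.length - 2) 0 * s.getD (s.length - 1) 0 ∈
        tripProds s := tripProds_mem (by omega) (by omega) (by omega)
    have hc2 : s.getD 0 0 * s.getD 1 0 * s.getD (s.length - 1) 0 ∈ tripProds s :=
      tripProds_mem (by omega) (by omega) (by omega)
    -- every triple product of s is below one of the two candidates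
    have hub : ∀ t ∈ tripProds s, t ≤
        max (s.getD (s.length - 3) 0 * s.getD (s.length - 2) 0 * s.getD (s.length - 1) 0)
          (s.getD 0 0 * s.getD 1 0 * s.getD (s.length - 1) 0) := by
      intro t ht
      obtain ⟨i, j, k, hij, hjk, hk, rfl⟩ := mem_tripProds ht
      rcases Nat.eq_or_lt_of_le hn3 with h3 | h4
      · -- exactly three elements: the product IS the second candidate
        have hi : i = 0 := by omega
        have hjv : j = 1 := by omega
        have hkv : k = 2 := by omega
        subst hi hjv hkv
        refine le_trans (le_of_eq ?_) (le_max_right _ _)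
        rw [show s.length - 1 = 2 from by omega]
      · -- at least four elements: the sign analysis applies
        exact key_ineq _ _ _ _ _ _ _ _
          (mono 0 i (by omega) (by omega)) (mono 1 j (by omega) (by omega))
          (mono i (s.length - 3) (by omega) (by omega)) (mono j (s.length - 2) (by omega) (by omega))
          (mono k (s.length - 1) (by omega) (by omega)) (mono i j (by omega) (by omega))
          (mono j k (by omega) (by omega)) (mono (s.length - 3) (s.length - 2) (by omega) (by omega))
          (mono (s.length - 2) (s.length - 1) (by omega) (by omega))
          (mono 1 (s.length - 3) (by omega) (by omega))
    have hM : max (s.getD (s.length - 3) 0 * s.getD (s.length - 2) 0 * s.getD (s.length - 1) 0)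
        (s.getD 0 0 * s.getD 1 0 * s.getD (s.length - 1) 0) ∈ tripProds s := by
      rcases max_choice (s.getD (s.length - 3) 0 * s.getD (s.length - 2) 0 * s.getD (s.length - 1) 0)
        (s.getD 0 0 * s.getD 1 0 * s.getD (s.length - 1) 0) with h | h <;> rw [h] <;> assumption
    have hfold : (tripProds s).foldl max 0 =
        max 0 (max (s.getD (s.length - 3) 0 * s.getD (s.length - 2) 0 * s.getD (s.length - 1) 0)
          (s.getD 0 0 * s.getD 1 0 * s.getD (s.length - 1) 0)) := by
      apply le_antisymm
      · rcases PySem.List.foldl_max_mem (tripProds s) 0 with h | h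
        · rw [h]; exact le_max_left _ _
        · exact le_trans (hub _ h) (le_max_right _ _)
      · exact max_le (PySem.List.le_foldl_max _ 0).1 ((PySem.List.le_foldl_max _ 0).2 _ hM)
    rw [hA, hB, hfold,
      show s.getD (s.length - 1) 0 * s.getD (s.length - 2) 0 * s.getD (s.length - 3) 0 =
        s.getD (s.length - 3) 0 * s.getD (s.length - 2) 0 * s.getD (s.length - 1) 0 from by ring,
      max_assoc]

-- ===== VERDICT (by name: the statement is the Claim_ definition above) =====
theorem maxoftriplet2_spec : Claim_equal_maxoftriplet2 := by
  unfold Claim_equal_maxoftriplet2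
  intro lis _
  unfold Spec_maxoftriplet2
  exact main_eq lis
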